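-- pv_equiv track=rewrite | github.com/scylladb/scylladb | test/nodetool/test_describecluster.py | normalize_cluster_info
-- ===== SOURCE A (Python) =====
-- def normalize_cluster_info(cluster_info):
--     # Cassandra's nodetool uses HashMap under the hood for collecting the map
--     # from versions to hosts on that version, and print out them by iterating
--     # the keys, but the order is not guaranteed to be ordered or consistent, so
--     # let's extract the items in "schema_versions" out and sort them before
--     # comparing.
--     expecting_schema_versions = False
--     normalized = []
--     schema_versions = []
--     for line in cluster_info.split('\n'):
--         if expecting_schema_versions:
--             schema_versions.append(line)
--         else:
--             if line.strip().startswith('Schema versions:'):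
--                 expecting_schema_versions = True
--             normalized.append(line)
--     normalized += sorted(schema_versions)
--     return normalized
-- ===== SOURCE B (Python) =====
-- def normalize_cluster_info(cluster_info):
--     # One backward pass, one accumulator, no flag and no marker search:
--     # scanning right-to-left, `out` is always the normalized form of the
--     # suffix seen so far (hence a permutation of its raw lines), so on a
--     # marker line sorting `out` yields the sorted raw suffix.
--     out = []
--     for line in reversed(cluster_info.split('\n')):
--         if line.strip().startswith('Schema versions:'):
--             out = [line] + sorted(out)
--         else:
--             out = [line] + out
--     return out
-- ===== Notes on version B (the rewrite author's own statement) =====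
-- stated objective: alternative
-- what changed: Replaces A's forward flag loop with three accumulators by a single right-to-left fold with one accumulator: the accumulator is always the normalized suffix (a permutation of the raw suffix), so a marker line just re-sorts it; no flag, no marker search, no separate schema_versions list.
import Mathlib
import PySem

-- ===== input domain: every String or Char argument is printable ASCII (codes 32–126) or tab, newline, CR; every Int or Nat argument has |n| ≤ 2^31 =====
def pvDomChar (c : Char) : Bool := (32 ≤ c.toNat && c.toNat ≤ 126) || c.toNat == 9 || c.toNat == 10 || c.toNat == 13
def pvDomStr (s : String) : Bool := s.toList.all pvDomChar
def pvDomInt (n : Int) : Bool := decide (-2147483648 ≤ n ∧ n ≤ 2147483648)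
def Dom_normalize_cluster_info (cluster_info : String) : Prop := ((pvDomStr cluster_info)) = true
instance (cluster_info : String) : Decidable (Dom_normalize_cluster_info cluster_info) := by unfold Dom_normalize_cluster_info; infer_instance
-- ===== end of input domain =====

-- ===== PORT A =====
-- B replaces A's forward flag loop (three accumulators) by one right-to-left fold
-- with a single accumulator that is re-sorted at a marker line (objective: alternative).
-- A's loop state: (expecting_schema_versions, normalized, schema_versions)
def pvStepA (st : Bool × List String × List String) (line : String) : Bool × List String × List String :=
  if st.1 then (st.1, st.2.1, st.2.2 ++ [line])
  else if PySem.Str.startswith (PySem.Str.strip line) "Schema versions:" then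
    (true, st.2.1 ++ [line], st.2.2)
  else
    (false, st.2.1 ++ [line], st.2.2)

def normalize_cluster_info (cluster_info : String) : List String :=
  let st := ((PySem.Str.split? cluster_info "\n").getD []).foldl pvStepA (false, [], [])
  st.2.1 ++ PySem.List.sorted st.2.2 (fun x => x) false

-- ===== PORT B =====
-- Python B's `for line in reversed(lines): out = step(line, out)` is exactly List.foldr step [] lines.
def pvStepB (line : String) (out : List String) : List String :=
  if PySem.Str.startswith (PySem.Str.strip line) "Schema versions:" then
    line :: PySem.List.sorted out (fun x => x) false
  else
    line :: out

def normalize_cluster_info_alt (cluster_info : String) : List String :=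
  ((PySem.Str.split? cluster_info "\n").getD []).foldr pvStepB []

-- ===== PRECONDITION & SPEC =====
def Spec_normalize_cluster_info (cluster_info : String) (out : List String) : Prop := out = normalize_cluster_info_alt cluster_info
instance (cluster_info : String) (out : List String) : Decidable (Spec_normalize_cluster_info cluster_info out) := by unfold Spec_normalize_cluster_info; infer_instance

-- ===== CLAIM =====
def Claim_equal_normalize_cluster_info : Prop := ∀ (cluster_info : String), Dom_normalize_cluster_info cluster_info → Spec_normalize_cluster_info cluster_info (normalize_cluster_info cluster_info)

-- ===== LEMMAS AND PROOFS =====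

-- B's accumulator is always a permutation of the raw suffix
theorem pvFoldB_perm (lines : List String) : (lines.foldr pvStepB []).Perm lines := by
  induction lines with
  | nil => simp
  | cons l ls ih =>
    simp only [List.foldr_cons, pvStepB]
    split_ifs with h
    · exact List.Perm.cons l ((PySem.List.sorted_perm _ _ _).trans ih)
    · exact List.Perm.cons l ih

-- once the flag is set, A's loop only appends the remaining lines to schema_versions
theorem pvFoldA_true (lines : List String) (n s : List String) :
    lines.foldl pvStepA (true, n, s) = (true, n, s ++ lines) := by
  induction lines generalizing s with
  | nil => simp
  | cons l ls ih => simp [pvStepA, ih]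

-- A's loop from a clean (flag-off) state computes B's backward fold
theorem pvFoldA_eq_foldB (lines : List String) (n : List String) :
    (let st := lines.foldl pvStepA (false, n, [])
     st.2.1 ++ PySem.List.sorted st.2.2 (fun x => x) false) =
    n ++ lines.foldr pvStepB [] := by
  induction lines generalizing n with
  | nil => simp [PySem.List.sorted]
  | cons l ls ih =>
    by_cases h : PySem.Str.startswith (PySem.Str.strip l) "Schema versions:"
    · simp only [List.foldl_cons, pvStepA, h, if_true, Bool.false_eq_true, if_false,
        List.foldr_cons, pvStepB, pvFoldA_true, List.nil_append]
      rw [PySem.List.sorted_eq_sorted_of_perm ls (ls.foldr pvStepB []) (fun x => x)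
        (fun _ _ hxy => hxy) (pvFoldB_perm ls).symm]
      simp
    · simp only [List.foldl_cons, pvStepA, h, Bool.false_eq_true, if_false,
        List.foldr_cons, pvStepB]
      rw [ih (n ++ [l])]
      simp

-- ===== VERDICT =====
theorem normalize_cluster_info_spec : Claim_equal_normalize_cluster_info := by
  intro ci _
  unfold Spec_normalize_cluster_info normalize_cluster_info normalize_cluster_info_alt
  simpa using pvFoldA_eq_foldB ((PySem.Str.split? ci "\n").getD []) []
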